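-- pv_equiv track=rewrite | github.com/hplgit/parampool | misc/list_tree_leftovers.py | cml_arg_match
-- ===== SOURCE A (Python) =====
-- def cml_arg_match(cml_arg, cml_args):
--     """
--     See of cml_arg is a unique short form of any of the valid
--     arguments in cml_args.
--     """
--     cml_arg = cml_arg[2:]  # strip off -- prefix
--     cml_args_short = [arg[-len(cml_arg):] for arg in cml_args]
--     if cml_args_short.count(cml_arg) == 1:
--         # return unique match
--         index = cml_args_short.index(cml_arg)
--         return cml_args[index]
--     else:
--         raise ValueError('non-unique command-line argument %s' % cml_arg)
-- ===== SOURCE B (Python) =====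
-- def cml_arg_match(cml_arg, cml_args):
--     """Recursive descent: return the unique match as an Option-like value
--     (None = no match), raising as soon as a second match would exist.
--     No intermediate suffix list, no counting, no indexing."""
--     cml_arg = cml_arg[2:]  # strip off -- prefix
--
--     def unique(args):
--         if not args:
--             return None
--         rest = unique(args[1:])
--         if args[0][-len(cml_arg):] == cml_arg:
--             if rest is not None:
--                 raise ValueError('non-unique command-line argument %s' % cml_arg)
--             return args[0]
--         return rest
--
--     m = unique(cml_args)
--     if m is None:
--         raise ValueError('non-unique command-line argument %s' % cml_arg)
--     return m
-- ===== Notes on version B (the rewrite author's own statement) =====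
-- stated objective: alternative
-- what changed: A builds a whole suffix list, counts it and re-scans it with .index plus a list lookup; B recursively descends the argument list carrying an Option-valued 'unique match so far' (no intermediate list, no counting, no indexing) and raises the moment a second match appears.
import Mathlib
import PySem

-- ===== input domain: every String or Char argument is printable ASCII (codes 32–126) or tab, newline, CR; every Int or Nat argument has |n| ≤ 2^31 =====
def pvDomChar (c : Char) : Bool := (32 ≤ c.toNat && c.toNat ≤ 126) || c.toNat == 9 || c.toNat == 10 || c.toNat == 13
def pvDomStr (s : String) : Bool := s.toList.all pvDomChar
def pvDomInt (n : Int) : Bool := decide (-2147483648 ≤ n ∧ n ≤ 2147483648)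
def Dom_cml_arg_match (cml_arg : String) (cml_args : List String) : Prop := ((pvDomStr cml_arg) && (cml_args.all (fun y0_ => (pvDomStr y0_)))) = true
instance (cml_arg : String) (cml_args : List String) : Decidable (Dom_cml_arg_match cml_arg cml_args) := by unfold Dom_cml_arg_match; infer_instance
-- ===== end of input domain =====

-- B replaces A's three staged passes (build the suffix list, count it, .index into it, look up)
-- by a recursive descent carrying an Option-valued 'unique match so far'; objective: alternative.

-- ===== PORT A =====
-- step for step: strip "--", build suffix list, count, index, list lookup
def cml_arg_match (cml_arg : String) (cml_args : List String) : String :=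
  let ca := PySem.Str.slice cml_arg (some 2) none
  let shorts := cml_args.map (fun arg => PySem.Str.slice arg (some (-(PySem.Str.len ca))) none)
  if PySem.List.count shorts ca = 1 then
    match PySem.List.index? shorts ca with
    | some idx => (PySem.List.pyGet? cml_args (idx : Int)).getD ""
    | none => ""
  else
    ""  -- Python raises ValueError here; excluded by Pre_

-- ===== PORT B =====
-- recursive helper 'unique': none = no match; a second match raises (modeled as some "",
-- unreachable under Pre_)
def uniqueMatch (ca : String) : List String → Option String
  | [] => none
  | a :: rest =>
    let r := uniqueMatch ca rest
    if PySem.Str.slice a (some (-(PySem.Str.len ca))) none == ca then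
      match r with
      | some _ => some ""  -- Python raises ValueError here; excluded by Pre_
      | none => some a
    else r

def cml_arg_match_alt (cml_arg : String) (cml_args : List String) : String :=
  let ca := PySem.Str.slice cml_arg (some 2) none
  match uniqueMatch ca cml_args with
  | some m => m
  | none => ""  -- Python raises ValueError here; excluded by Pre_

-- ===== PRECONDITION & SPEC =====
-- Pre_ = exactly the inputs on which A returns: exactly one argument whose trailing
-- len(cml_arg[2:]) characters (the whole argument when that length is 0) equal cml_arg[2:];
-- on every other input A raises ValueError.
def Pre_cml_arg_match (cml_arg : String) (cml_args : List String) : Prop :=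
  cml_args.countP
    (fun arg => PySem.Str.slice arg (some (-(PySem.Str.len (PySem.Str.slice cml_arg (some 2) none)))) none
      == PySem.Str.slice cml_arg (some 2) none) = 1

instance (cml_arg : String) (cml_args : List String) : Decidable (Pre_cml_arg_match cml_arg cml_args) := by
  unfold Pre_cml_arg_match; infer_instance

def pvWitness_cml_arg_match : String × List String := ("--to", ["stop", "tomato"])

def Spec_cml_arg_match (cml_arg : String) (cml_args : List String) (out : String) : Prop := out = cml_arg_match_alt cml_arg cml_args
instance (cml_arg : String) (cml_args : List String) (out : String) : Decidable (Spec_cml_arg_match cml_arg cml_args out) := by unfold Spec_cml_arg_match; infer_instance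

-- ===== CLAIM (what is proved, stated in full; the proofs are below) =====
def Claim_equal_cml_arg_match : Prop := ∀ (cml_arg : String) (cml_args : List String), Dom_cml_arg_match cml_arg cml_args → Pre_cml_arg_match cml_arg cml_args → Spec_cml_arg_match cml_arg cml_args (cml_arg_match cml_arg cml_args)

-- ===== LEMMAS AND PROOFS =====

-- with no match at all the recursion returns none
theorem uniqueMatch_none (ca : String) (l : List String)
    (h : l.countP (fun arg => PySem.Str.slice arg (some (-(PySem.Str.len ca))) none == ca) = 0) :
    uniqueMatch ca l = none := by
  induction l with
  | nil => rfl
  | cons x t ih =>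
    rw [List.countP_cons] at h
    by_cases hx : (PySem.Str.slice x (some (-(PySem.Str.len ca))) none == ca) = true
    · rw [if_pos hx] at h; omega
    · have ht : t.countP (fun arg => PySem.Str.slice arg (some (-(PySem.Str.len ca))) none == ca) = 0 := by
        rw [if_neg hx] at h; omega
      simp only [uniqueMatch]
      rw [if_neg hx]
      exact ih ht

-- when exactly one element matches, A's index?-then-lookup equals B's recursive descent
theorem core_eq (ca : String) (l : List String)
    (h : l.countP (fun arg => PySem.Str.slice arg (some (-(PySem.Str.len ca))) none == ca) = 1) :
    (match PySem.List.index?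
        (l.map (fun arg => PySem.Str.slice arg (some (-(PySem.Str.len ca))) none)) ca with
      | some idx => (PySem.List.pyGet? l (idx : Int)).getD ""
      | none => "") =
    (match uniqueMatch ca l with
      | some m => m
      | none => "") := by
  induction l with
  | nil => simp at h
  | cons x t ih =>
    rw [List.countP_cons] at h
    by_cases hx : (PySem.Str.slice x (some (-(PySem.Str.len ca))) none == ca) = true
    · have hxe : PySem.Str.slice x (some (-(PySem.Str.len ca))) none = ca := eq_of_beq hx
      have ht0 : t.countP (fun arg => PySem.Str.slice arg (some (-(PySem.Str.len ca))) none == ca) = 0 := by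
        simp only [hx, if_pos] at h; omega
      have hu : uniqueMatch ca t = none := uniqueMatch_none ca t ht0
      have hB : uniqueMatch ca (x :: t) = some x := by
        simp only [uniqueMatch]; rw [if_pos hx, hu]
      simp only [List.map_cons, hxe]
      rw [PySem.List.index?_cons_self, hB]
      simp
    · have hxe : PySem.Str.slice x (some (-(PySem.Str.len ca))) none ≠ ca := by simpa using hx
      have ht1 : t.countP (fun arg => PySem.Str.slice arg (some (-(PySem.Str.len ca))) none == ca) = 1 := by
        rw [if_neg hx] at h; omega
      have hmem : ca ∈ t.map (fun arg => PySem.Str.slice arg (some (-(PySem.Str.len ca))) none) := by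
        have hpos : 0 < t.countP (fun arg => PySem.Str.slice arg (some (-(PySem.Str.len ca))) none == ca) := by omega
        rcases List.countP_pos_iff.mp hpos with ⟨a, ha, hpa⟩
        exact List.mem_map.mpr ⟨a, ha, eq_of_beq (by simpa using hpa)⟩
      obtain ⟨j, hj⟩ := Option.isSome_iff_exists.mp ((PySem.List.index?_isSome_iff _ _).mpr hmem)
      simp only [List.map_cons]
      rw [PySem.List.index?_cons_of_ne _ hxe, hj]
      simp only [Option.map_some]
      have hih := ih ht1
      rw [hj] at hih
      have hget : PySem.List.pyGet? (x :: t) ((j + 1 : Nat) : Int) = PySem.List.pyGet? t (j : Int) := by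
        simp
      have hB : uniqueMatch ca (x :: t) = uniqueMatch ca t := by
        simp only [uniqueMatch]; rw [if_neg hx]
      simp only [Nat.cast_add, Nat.cast_one] at hget ⊢
      rw [hget, hB]
      exact hih

-- ===== VERDICT (by name: the statement is the Claim_ definition above) =====
theorem cml_arg_match_spec : Claim_equal_cml_arg_match := by
  intro cml_arg cml_args _ hpre
  unfold Pre_cml_arg_match at hpre
  unfold Spec_cml_arg_match cml_arg_match cml_arg_match_alt
  have hcount : PySem.List.count
      (cml_args.map (fun arg =>
        PySem.Str.slice arg (some (-(PySem.Str.len (PySem.Str.slice cml_arg (some 2) none)))) none))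
      (PySem.Str.slice cml_arg (some 2) none) = 1 := by
    rw [PySem.List.count_eq, List.count_eq_countP, List.countP_map]
    exact hpre
  simp only []
  rw [if_pos hcount]
  exact core_eq _ cml_args hpre
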